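-- pv_equiv track=rewrite | github.com/milosptr/discrete_math_relations | relations.py | aces_in_relation_e
-- ===== SOURCE A (Python) =====
-- def aces_in_relation_e(A: list[int]) -> int:
--   n: int = len(A)
--   aces: int = 0
--
--   if n == 0:
--     return 0
--
--   for a in range(n):
--     for b in range(n):
--        # {(a, b) | a + b ≥ 1001} is a condition on a task
--        if A[a] + A[b] >= 1001:
--           aces += 1
--
--   return aces
-- ===== SOURCE B (Python) =====
-- def aces_in_relation_e(A: list[int]) -> int:
--   # Sort once, then for each x binary-search the first index with value >= 1001 - x.
--   S = sorted(A)
--   n = len(S)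
--   total = 0
--   for x in A:
--     t = 1001 - x
--     lo, hi = 0, n
--     while lo < hi:
--       mid = (lo + hi) // 2
--       if S[mid] < t:
--         lo = mid + 1
--       else:
--         hi = mid
--     total += n - lo
--   return total
-- ===== Notes on version B (the rewrite author's own statement) =====
-- stated objective: faster
-- what changed: Replaces the O(n^2) nested index loops with a single sort followed by one hand-written binary search per element for the first value >= 1001 - x.
import Mathlib
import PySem

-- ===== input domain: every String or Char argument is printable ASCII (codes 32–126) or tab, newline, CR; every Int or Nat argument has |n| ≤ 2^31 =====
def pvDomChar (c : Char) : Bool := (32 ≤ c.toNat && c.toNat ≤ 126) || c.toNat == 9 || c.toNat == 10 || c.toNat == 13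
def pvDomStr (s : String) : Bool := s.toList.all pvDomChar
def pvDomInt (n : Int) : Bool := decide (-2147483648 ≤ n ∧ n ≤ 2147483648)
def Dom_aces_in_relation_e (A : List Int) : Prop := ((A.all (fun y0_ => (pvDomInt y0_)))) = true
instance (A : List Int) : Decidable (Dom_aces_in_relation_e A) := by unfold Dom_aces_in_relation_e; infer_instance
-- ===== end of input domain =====

-- B replaces A's O(n^2) nested index loops by one sort plus a hand-written binary search per element (objective: faster).

-- ===== PORT A =====
def aces_in_relation_e (A : List Int) : Int :=
  let n : Int := A.length
  if n == 0 then 0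
  else
    (PySem.List.pyRange 0 n 1).foldl (fun aces a =>
      (PySem.List.pyRange 0 n 1).foldl (fun aces b =>
        if PySem.List.pyGetD A a 0 + PySem.List.pyGetD A b 0 ≥ 1001 then aces + 1 else aces)
        aces) 0

-- ===== PORT B =====
-- the hand-written bisect-left 'while lo < hi' loop of Source B; the fuel argument
-- (hi - lo).toNat only makes the recursion structural, it never cuts the loop short
def pvBisectGo : Nat → List Int → Int → Int → Int → Int
  | 0, _, _, lo, _ => lo
  | fuel + 1, S, t, lo, hi =>
    if lo < hi then
      let mid := PySem.Int.floordiv (lo + hi) 2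
      if PySem.List.pyGetD S mid 0 < t then pvBisectGo fuel S t (mid + 1) hi
      else pvBisectGo fuel S t lo mid
    else lo

def pvBisect (S : List Int) (t lo hi : Int) : Int := pvBisectGo (hi - lo).toNat S t lo hi

def aces_in_relation_e_alt (A : List Int) : Int :=
  let S := PySem.List.sorted A (fun x => x) false
  let n : Int := S.length
  A.foldl (fun total x => total + (n - pvBisect S (1001 - x) 0 n)) 0

-- ===== PRECONDITION & SPEC =====
def Spec_aces_in_relation_e (A : List Int) (out : Int) : Prop := out = aces_in_relation_e_alt A
instance (A : List Int) (out : Int) : Decidable (Spec_aces_in_relation_e A out) := by unfold Spec_aces_in_relation_e; infer_instance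

-- ===== CLAIM (what is proved, stated in full; the proofs are below) =====
def Claim_equal_aces_in_relation_e : Prop := ∀ (A : List Int), Dom_aces_in_relation_e A → Spec_aces_in_relation_e A (aces_in_relation_e A)

-- ===== LEMMAS AND PROOFS =====

-- the inner 'for b in range(n)' loop of A, as a function of the outer element x = A[a]
def pvInner (A : List Int) (acc x : Int) : Int :=
  (PySem.List.pyRange 0 (A.length : Int) 1).foldl
    (fun aces b => if x + PySem.List.pyGetD A b 0 ≥ 1001 then aces + 1 else aces) acc

theorem pvInner_eq (A : List Int) (acc x : Int) :
    pvInner A acc x = acc + ((A.countP fun y => decide (1001 ≤ x + y) : Nat) : Int) := by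
  unfold pvInner
  rw [PySem.List.foldl_pyRange_zero_pyGetD' A 0
      (fun aces y => if x + y ≥ 1001 then aces + 1 else aces) acc]
  exact PySem.List.foldl_ite_add_one (fun y => 1001 ≤ x + y) A acc

-- a list that is everywhere < t before index k and ≥ t from k on has exactly k elements < t
theorem pv_countP_split (S : List Int) (t : Int) (k : Nat) (hk : k ≤ S.length)
    (h1 : ∀ (i : Nat) (h : i < S.length), i < k → S[i] < t)
    (h2 : ∀ (i : Nat) (h : i < S.length), k ≤ i → t ≤ S[i]) :
    S.countP (fun y => decide (y < t)) = k := by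
  have hsplit : S.countP (fun y => decide (y < t)) =
      (S.take k).countP (fun y => decide (y < t)) + (S.drop k).countP (fun y => decide (y < t)) := by
    rw [← List.countP_append, List.take_append_drop]
  have htake : (S.take k).countP (fun y => decide (y < t)) = k := by
    have hall : ∀ a ∈ S.take k, (fun y => decide (y < t)) a = true := by
      intro a ha
      obtain ⟨i, hi, hEq⟩ := List.mem_iff_getElem.mp ha
      have hlen : i < k ∧ i < S.length := by
        rw [List.length_take] at hi; omega
      have hg : (S.take k)[i] = S[i]'hlen.2 := List.getElem_take
      rw [hg] at hEq
      subst hEq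
      simpa using h1 i hlen.2 hlen.1
    rw [List.countP_eq_length.mpr hall, List.length_take]
    omega
  have hdrop : (S.drop k).countP (fun y => decide (y < t)) = 0 := by
    apply List.countP_eq_zero.mpr
    intro a ha
    obtain ⟨i, hi, hEq⟩ := List.mem_iff_getElem.mp ha
    have hlen : k + i < S.length := by
      rw [List.length_drop] at hi; omega
    have hg : (S.drop k)[i] = S[k + i]'hlen := List.getElem_drop
    rw [hg] at hEq
    subst hEq
    have := h2 (k + i) hlen (by omega)
    simp; omega
  omega

-- the bisect loop on a sorted segment computes the number of elements < t
theorem pvBisectGo_eq (S : List Int) (hS : S.Pairwise (· ≤ ·)) (t : Int) :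
    ∀ (fuel : Nat) (lo hi : Int), (hi - lo).toNat ≤ fuel → 0 ≤ lo → lo ≤ hi → hi ≤ (S.length : Int) →
    (∀ (i : Nat) (h : i < S.length), (i : Int) < lo → S[i] < t) →
    (∀ (i : Nat) (h : i < S.length), hi ≤ (i : Int) → t ≤ S[i]) →
    pvBisectGo fuel S t lo hi = ((S.countP fun y => decide (y < t) : Nat) : Int) := by
  have hpw : ∀ (i j : Nat) (hi : i < S.length) (hj : j < S.length), i < j → S[i] ≤ S[j] :=
    fun i j hi hj hij => (List.pairwise_iff_getElem.mp hS) i j hi hj hij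
  intro fuel
  induction fuel with
  | zero =>
    intro lo hi hfuel h0 hlh hhi hpre hpost
    have hEq : lo = hi := by omega
    show lo = ((S.countP fun y => decide (y < t) : Nat) : Int)
    have := pv_countP_split S t lo.toNat (by omega)
      (fun i h hik => hpre i h (by omega))
      (fun i h hki => hpost i h (by omega))
    omega
  | succ fuel ih =>
    intro lo hi hfuel h0 hlh hhi hpre hpost
    by_cases hlt : lo < hi
    · show (if lo < hi then
          let mid := PySem.Int.floordiv (lo + hi) 2
          if PySem.List.pyGetD S mid 0 < t then pvBisectGo fuel S t (mid + 1) hi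
          else pvBisectGo fuel S t lo mid
        else lo) = ((S.countP fun y => decide (y < t) : Nat) : Int)
      rw [if_pos hlt]
      show (if PySem.List.pyGetD S (PySem.Int.floordiv (lo + hi) 2) 0 < t then
          pvBisectGo fuel S t (PySem.Int.floordiv (lo + hi) 2 + 1) hi
        else pvBisectGo fuel S t lo (PySem.Int.floordiv (lo + hi) 2)) =
        ((S.countP fun y => decide (y < t) : Nat) : Int)
      have hml : lo ≤ PySem.Int.floordiv (lo + hi) 2 :=
        (PySem.Int.le_floordiv_iff_mul_le (by omega)).mpr (by omega)
      have hmh : PySem.Int.floordiv (lo + hi) 2 < hi :=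
        (PySem.Int.floordiv_lt_iff_lt_mul (by omega)).mpr (by omega)
      set mid := PySem.Int.floordiv (lo + hi) 2 with hmid
      have hmlen : mid < (S.length : Int) := by omega
      have hm0 : 0 ≤ mid := by omega
      have hmn : mid.toNat < S.length := by omega
      rw [PySem.List.pyGetD_eq_getElem S 0 hm0 hmlen]
      by_cases hc : S[mid.toNat] < t
      · rw [if_pos hc]
        apply ih (mid + 1) hi (by omega) (by omega) (by omega) hhi _ hpost
        intro i h hilt
        rcases Nat.lt_or_ge i mid.toNat with hi2 | hi2
        · exact lt_of_le_of_lt (hpw i mid.toNat h hmn hi2) hc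
        · have : i = mid.toNat := by omega
          subst this; exact hc
      · rw [if_neg hc]
        apply ih lo mid (by omega) h0 (by omega) (by omega) hpre
        intro i h hile
        have ht : t ≤ S[mid.toNat] := not_lt.mp hc
        rcases Nat.lt_or_ge mid.toNat i with hi2 | hi2
        · exact le_trans ht (hpw mid.toNat i hmn h hi2)
        · have : i = mid.toNat := by omega
          subst this; exact ht
    · show (if lo < hi then
          let mid := PySem.Int.floordiv (lo + hi) 2
          if PySem.List.pyGetD S mid 0 < t then pvBisectGo fuel S t (mid + 1) hi
          else pvBisectGo fuel S t lo mid
        else lo) = ((S.countP fun y => decide (y < t) : Nat) : Int)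
      rw [if_neg hlt]
      have := pv_countP_split S t lo.toNat (by omega)
        (fun i h hik => hpre i h (by omega))
        (fun i h hki => hpost i h (by omega))
      omega

theorem pvA_eq (A : List Int) :
    aces_in_relation_e A =
      A.foldl (fun acc x => acc + ((A.countP fun y => decide (1001 ≤ x + y) : Nat) : Int)) 0 := by
  show (if ((A.length : Int) == 0) then (0 : Int)
      else (PySem.List.pyRange 0 (A.length : Int) 1).foldl (fun aces a =>
        (PySem.List.pyRange 0 (A.length : Int) 1).foldl (fun aces b =>
          if PySem.List.pyGetD A a 0 + PySem.List.pyGetD A b 0 ≥ 1001 then aces + 1 else aces)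
          aces) 0) = _
  by_cases hA : A = []
  · subst hA; simp
  · have hbeq : ((A.length : Int) == 0) = false := by
      simp [hA]
    rw [hbeq]
    simp only [Bool.false_eq_true, if_false]
    have step1 : (PySem.List.pyRange 0 (A.length : Int) 1).foldl (fun aces a =>
        (PySem.List.pyRange 0 (A.length : Int) 1).foldl (fun aces b =>
          if PySem.List.pyGetD A a 0 + PySem.List.pyGetD A b 0 ≥ 1001 then aces + 1 else aces)
          aces) 0 = A.foldl (pvInner A) 0 :=
      PySem.List.foldl_pyRange_zero_pyGetD' A 0 (pvInner A) 0
    rw [step1]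
    have hfun : pvInner A = fun acc x => acc + ((A.countP fun y => decide (1001 ≤ x + y) : Nat) : Int) :=
      funext fun acc => funext fun x => pvInner_eq A acc x
    rw [hfun]

theorem pvB_eq (A : List Int) :
    aces_in_relation_e_alt A =
      A.foldl (fun acc x => acc + ((A.countP fun y => decide (1001 ≤ x + y) : Nat) : Int)) 0 := by
  show A.foldl (fun total x => total +
      (((PySem.List.sorted A (fun x => x) false).length : Int) -
        pvBisect (PySem.List.sorted A (fun x => x) false) (1001 - x) 0
          ((PySem.List.sorted A (fun x => x) false).length))) 0 = _
  have hpair : (PySem.List.sorted A (fun x => x) false).Pairwise (· ≤ ·) :=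
    PySem.List.sorted_pairwise A (fun x => x)
  have hperm : (PySem.List.sorted A (fun x => x) false).Perm A :=
    PySem.List.sorted_perm A (fun x => x) false
  have hfun : (fun (total x : Int) => total +
      (((PySem.List.sorted A (fun x => x) false).length : Int) -
        pvBisect (PySem.List.sorted A (fun x => x) false) (1001 - x) 0
          ((PySem.List.sorted A (fun x => x) false).length))) =
      (fun acc x => acc + ((A.countP fun y => decide (1001 ≤ x + y) : Nat) : Int)) := by
    funext total x
    set S := PySem.List.sorted A (fun x => x) false with hSdef
    have hb : pvBisect S (1001 - x) 0 (S.length : Int) =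
        ((S.countP fun y => decide (y < 1001 - x) : Nat) : Int) :=
      pvBisectGo_eq S hpair (1001 - x) (((S.length : Int) - 0).toNat) 0 (S.length : Int)
        (le_refl _) (by omega) (by omega) (le_refl _)
        (fun i h hlt => absurd hlt (by omega))
        (fun i h hle => absurd hle (by omega))
    rw [hb]
    have hlen := List.length_eq_countP_add_countP (fun y => decide (y < 1001 - x)) (l := S)
    have hcong : S.countP (fun a => decide ¬((fun y => decide (y < 1001 - x)) a = true)) =
        S.countP (fun y => decide (1001 ≤ x + y)) := by
      apply List.countP_congr
      intro a _
      simp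
      omega
    rw [hcong] at hlen
    have hpc : S.countP (fun y => decide (1001 ≤ x + y)) = A.countP (fun y => decide (1001 ≤ x + y)) :=
      hperm.countP_eq _
    omega
  rw [hfun]

-- ===== VERDICT (by name: the statement is the Claim_ definition above) =====
theorem aces_in_relation_e_spec : Claim_equal_aces_in_relation_e := by
  intro A _hDom
  unfold Spec_aces_in_relation_e
  exact (pvA_eq A).trans (pvB_eq A).symm
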